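-- pv_equiv track=rewrite | github.com/KuleenS/VLMBiasEval | src/dataset/visogender.py | occupation_template_sentences_all_pronouns
-- ===== SOURCE A (Python) =====
-- def occupation_template_sentences_all_pronouns(occupation: str, template_sentence:str, other_participant:str=None, other_object:str=None, model_domain: str="CLIP", context_op:bool=False)-> tuple:
--     """
--     Creates three sentences, based off either an occupation (if CLIP: and participant), or occupation If CLIP:and object)
--
--     Args:
--         occupation: name of occupation
--         template_sentence: input sentence in format similar to: f"A $OCCUPATION and $POSS_PRONOUN $PARTICIPANT" or f"A $OCCUPATION and " (captioning)
--         context: the type of image scenario - either occupation/participant (OP) or occupation/object(OO)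
--         other_participant: name of participant based on scene and context. Default None, for the captioning case
--         other_object: name of object, dependent on scene and context. Default none, for the captioning case
--         model_domain: either clip-like ("CLIP") or captioning ("CAPTIONING")
--
--
--     Returns:
--         tuple with three string sentences, each sentence containing the corresponding male/ female / neutral
--         pronoun. If the experiment is angle 1 - all three are required, if angle 2 - the first two sentences
--         in the tuple can be ignored
--     """
--
--     sentence_components = template_sentence.split(" ")
--     occ_index = sentence_components.index("$OCCUPATION")
--
--     if other_participant is not None or other_object is not None:
--         if model_domain  == "CLIP":
--             if context_op:
--                 part_index = sentence_components.index("$PARTICIPANT")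
--                 sentence_components[part_index] = other_participant
--             else:
--                 obj_index = sentence_components.index("$OBJECT")
--                 sentence_components[obj_index] = other_object
--
--     sentence_components[occ_index] = occupation
--
--     NOM = "$NOM_PRONOUN"
--     POSS = "$POSS_PRONOUN"
--     ACC = "$ACC_PRONOUN"
--     special_pronouns = set({NOM, POSS, ACC})
--     female_map = {NOM: "she", POSS: "her", ACC: "her"}
--     male_map = {NOM: "he", POSS: "his", ACC: "him"}
--     neutral_map = {NOM: "they", POSS: "their", ACC: "them"}
--
--     female_pronouns = [x if not x in special_pronouns else female_map[x] for x in sentence_components]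
--     male_pronouns = [x if not x in special_pronouns else male_map[x] for x in sentence_components]
--     neutral_pronouns = [x if not x in special_pronouns else neutral_map[x] for x in sentence_components]
--
--     male_sentence, female_sentence, neutral_sentence = " ".join(male_pronouns), " ".join(female_pronouns), " ".join(neutral_pronouns)
--
--
--     return male_sentence, female_sentence, neutral_sentence
-- ===== SOURCE B (Python) =====
-- def occupation_template_sentences_all_pronouns(occupation: str, template_sentence: str, other_participant: str = None, other_object: str = None, model_domain: str = "CLIP", context_op: bool = False) -> tuple:
--     # Single pass: substitute first $OCCUPATION / first $PARTICIPANT-or-$OBJECT via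
--     # flags and build all three pronoun variants in the same traversal.
--     clip = (other_participant is not None or other_object is not None) and model_domain == "CLIP"
--     if clip:
--         target, value = ("$PARTICIPANT", other_participant) if context_op else ("$OBJECT", other_object)
--     else:
--         target, value = None, None
--     pron = {"$NOM_PRONOUN": ("he", "she", "they"),
--             "$POSS_PRONOUN": ("his", "her", "their"),
--             "$ACC_PRONOUN": ("him", "her", "them")}
--     male, female, neutral = [], [], []
--     occ_done = sub_done = False
--     for tok in template_sentence.split(" "):
--         if tok == "$OCCUPATION" and not occ_done:
--             tok, occ_done = occupation, True
--         elif tok == target and not sub_done: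
--             tok, sub_done = value, True
--         trip = pron.get(tok, (tok, tok, tok))
--         male.append(trip[0]); female.append(trip[1]); neutral.append(trip[2])
--     if not occ_done:
--         raise ValueError("template has no $OCCUPATION token")
--     if target is not None and not sub_done:
--         raise ValueError("template has no %s token" % target)
--     return " ".join(male), " ".join(female), " ".join(neutral)
-- ===== Notes on version B (the rewrite author's own statement) =====
-- stated objective: alternative
-- what changed: B replaces A's index()/assignment substitutions followed by three separate placeholder-scanning list comprehensions with a single flag-based pass over the tokens that substitutes the first $OCCUPATION and the first $PARTICIPANT/$OBJECT on the fly and builds all three pronoun-variant token lists simultaneously from one pronoun-triple table.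
import Mathlib
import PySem

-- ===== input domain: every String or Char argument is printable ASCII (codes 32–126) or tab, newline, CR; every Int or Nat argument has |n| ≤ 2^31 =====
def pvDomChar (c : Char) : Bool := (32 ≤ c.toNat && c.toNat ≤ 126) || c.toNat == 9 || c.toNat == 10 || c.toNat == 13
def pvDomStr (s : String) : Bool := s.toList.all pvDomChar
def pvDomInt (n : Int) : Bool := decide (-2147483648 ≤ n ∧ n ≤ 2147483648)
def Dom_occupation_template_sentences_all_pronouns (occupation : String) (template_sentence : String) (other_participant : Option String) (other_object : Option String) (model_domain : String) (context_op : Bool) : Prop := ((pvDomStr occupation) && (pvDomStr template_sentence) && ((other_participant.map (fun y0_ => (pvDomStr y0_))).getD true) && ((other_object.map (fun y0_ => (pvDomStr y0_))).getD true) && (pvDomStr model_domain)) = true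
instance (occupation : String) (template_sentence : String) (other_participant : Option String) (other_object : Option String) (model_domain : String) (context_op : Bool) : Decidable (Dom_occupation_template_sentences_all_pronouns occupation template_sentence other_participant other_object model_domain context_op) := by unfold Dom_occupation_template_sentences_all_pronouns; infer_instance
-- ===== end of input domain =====

-- B builds the three pronoun-variant sentences in a single flag-based pass over the tokens
-- instead of A's .index/set substitutions followed by three separate placeholder-mapping passes.

-- ===== PORT A =====
-- A's three per-gender map functions: 'x if not x in special_pronouns else <gender>_map[x]'
def pvA_special : PySem.Set String := PySem.Set.ofList ["$NOM_PRONOUN", "$POSS_PRONOUN", "$ACC_PRONOUN"]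
def pvA_female : PySem.Dict String String := PySem.Dict.ofList [("$NOM_PRONOUN", "she"), ("$POSS_PRONOUN", "her"), ("$ACC_PRONOUN", "her")]
def pvA_male : PySem.Dict String String := PySem.Dict.ofList [("$NOM_PRONOUN", "he"), ("$POSS_PRONOUN", "his"), ("$ACC_PRONOUN", "him")]
def pvA_neutral : PySem.Dict String String := PySem.Dict.ofList [("$NOM_PRONOUN", "they"), ("$POSS_PRONOUN", "their"), ("$ACC_PRONOUN", "them")]

def occupation_template_sentences_all_pronouns (occupation : String) (template_sentence : String) (other_participant : Option String) (other_object : Option String) (model_domain : String) (context_op : Bool) : String × String × String :=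
  let sentence_components := (PySem.Str.split? template_sentence " ").getD []   -- separator " " ≠ "", so split? is always some
  match PySem.List.index? sentence_components "$OCCUPATION" with
  | none => ("", "", "")      -- Python raises ValueError here (excluded by Pre_)
  | some occ_index =>
    let substituted : Option (List String) :=
      if other_participant.isSome || other_object.isSome then
        if model_domain == "CLIP" then
          if context_op then
            match PySem.List.index? sentence_components "$PARTICIPANT" with
            | none => none    -- Python raises ValueError here (excluded by Pre_)
            | some part_index => some (sentence_components.set part_index (other_participant.getD ""))
              -- getD "": other_participant = None here makes Python's " ".join raise TypeError (excluded by Pre_)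
          else
            match PySem.List.index? sentence_components "$OBJECT" with
            | none => none    -- Python raises ValueError here (excluded by Pre_)
            | some obj_index => some (sentence_components.set obj_index (other_object.getD ""))
              -- getD "": other_object = None here makes Python's " ".join raise TypeError (excluded by Pre_)
        else some sentence_components
      else some sentence_components
    match substituted with
    | none => ("", "", "")
    | some sc =>
      let sc := sc.set occ_index occupation
      let female_pronouns := sc.map (fun x => if !(pvA_special.contains x) then x else (pvA_female.get? x).getD "")
      let male_pronouns := sc.map (fun x => if !(pvA_special.contains x) then x else (pvA_male.get? x).getD "")
      let neutral_pronouns := sc.map (fun x => if !(pvA_special.contains x) then x else (pvA_neutral.get? x).getD "")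
      (PySem.Str.join " " male_pronouns, PySem.Str.join " " female_pronouns, PySem.Str.join " " neutral_pronouns)

-- ===== PORT B =====
def pvB_pron : PySem.Dict String (String × String × String) :=
  PySem.Dict.ofList [("$NOM_PRONOUN", ("he", "she", "they")),
                     ("$POSS_PRONOUN", ("his", "her", "their")),
                     ("$ACC_PRONOUN", ("him", "her", "them"))]

-- one iteration of B's for-loop: state = ((occ_done, sub_done), male, female, neutral)
def pvB_step (occupation : String) (target : Option String) (value : String)
    (st : (Bool × Bool) × List String × List String × List String) (tok : String) :
    (Bool × Bool) × List String × List String × List String :=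
  let od := st.1.1
  let sd := st.1.2
  let (tok, od, sd) :=
    if tok == "$OCCUPATION" && !od then (occupation, true, sd)
    else if some tok == target && !sd then (value, od, true)
    else (tok, od, sd)
  let trip := (pvB_pron.get? tok).getD (tok, tok, tok)
  ((od, sd), st.2.1 ++ [trip.1], st.2.2.1 ++ [trip.2.1], st.2.2.2 ++ [trip.2.2])

def occupation_template_sentences_all_pronouns_alt (occupation : String) (template_sentence : String) (other_participant : Option String) (other_object : Option String) (model_domain : String) (context_op : Bool) : String × String × String :=
  let clip := (other_participant.isSome || other_object.isSome) && model_domain == "CLIP"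
  let tv : Option String × String :=
    if clip then
      if context_op then (some "$PARTICIPANT", other_participant.getD "")
      else (some "$OBJECT", other_object.getD "")
      -- getD "": a substituted None makes Python's " ".join raise TypeError (excluded by Pre_)
    else (none, "")
  let r := ((PySem.Str.split? template_sentence " ").getD []).foldl
    (pvB_step occupation tv.1 tv.2) ((false, false), [], [], [])
  if !r.1.1 then ("", "", "")             -- Python raises ValueError: no $OCCUPATION token (excluded by Pre_)
  else if tv.1.isSome && !r.1.2 then ("", "", "")   -- Python raises ValueError: no target token (excluded by Pre_)
  else (PySem.Str.join " " r.2.1, PySem.Str.join " " r.2.2.1, PySem.Str.join " " r.2.2.2)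

-- ===== PRECONDITION & SPEC =====
-- Pre_ is exactly where the Python A returns: it raises ValueError when "$OCCUPATION" (or, in the
-- CLIP substitution branch, "$PARTICIPANT"/"$OBJECT") is not a token, and TypeError when the
-- substituted participant/object is None (None ends up in " ".join).
def Pre_occupation_template_sentences_all_pronouns (occupation : String) (template_sentence : String) (other_participant : Option String) (other_object : Option String) (model_domain : String) (context_op : Bool) : Prop :=
  let sc := (PySem.Str.split? template_sentence " ").getD []
  "$OCCUPATION" ∈ sc ∧
  ((other_participant ≠ none ∨ other_object ≠ none) → model_domain = "CLIP" →
    (if context_op then "$PARTICIPANT" ∈ sc ∧ other_participant ≠ none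
     else "$OBJECT" ∈ sc ∧ other_object ≠ none))
instance (occupation : String) (template_sentence : String) (other_participant : Option String) (other_object : Option String) (model_domain : String) (context_op : Bool) : Decidable (Pre_occupation_template_sentences_all_pronouns occupation template_sentence other_participant other_object model_domain context_op) := by unfold Pre_occupation_template_sentences_all_pronouns; infer_instance

def pvWitness_occupation_template_sentences_all_pronouns : String × String × Option String × Option String × String × Bool :=
  ("doctor", "The $OCCUPATION and $NOM_PRONOUN $PARTICIPANT", some "person", none, "CLIP", true)

def Spec_occupation_template_sentences_all_pronouns (occupation : String) (template_sentence : String) (other_participant : Option String) (other_object : Option String) (model_domain : String) (context_op : Bool) (out : String × String × String) : Prop := out = occupation_template_sentences_all_pronouns_alt occupation template_sentence other_participant other_object model_domain context_op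
instance (occupation : String) (template_sentence : String) (other_participant : Option String) (other_object : Option String) (model_domain : String) (context_op : Bool) (out : String × String × String) : Decidable (Spec_occupation_template_sentences_all_pronouns occupation template_sentence other_participant other_object model_domain context_op out) := by unfold Spec_occupation_template_sentences_all_pronouns; infer_instance

-- ===== CLAIM (what is proved, stated in full; the proofs are below) =====
def Claim_equal_occupation_template_sentences_all_pronouns : Prop := ∀ (occupation : String) (template_sentence : String) (other_participant : Option String) (other_object : Option String) (model_domain : String) (context_op : Bool), Dom_occupation_template_sentences_all_pronouns occupation template_sentence other_participant other_object model_domain context_op → Pre_occupation_template_sentences_all_pronouns occupation template_sentence other_participant other_object model_domain context_op → Spec_occupation_template_sentences_all_pronouns occupation template_sentence other_participant other_object model_domain context_op (occupation_template_sentences_all_pronouns occupation template_sentence other_participant other_object model_domain context_op)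

-- ===== LEMMAS AND PROOFS =====

theorem pvWitness_ok :
    Dom_occupation_template_sentences_all_pronouns (pvWitness_occupation_template_sentences_all_pronouns.1) (pvWitness_occupation_template_sentences_all_pronouns.2.1) (pvWitness_occupation_template_sentences_all_pronouns.2.2.1) (pvWitness_occupation_template_sentences_all_pronouns.2.2.2.1) (pvWitness_occupation_template_sentences_all_pronouns.2.2.2.2.1) (pvWitness_occupation_template_sentences_all_pronouns.2.2.2.2.2) ∧
    Pre_occupation_template_sentences_all_pronouns (pvWitness_occupation_template_sentences_all_pronouns.1) (pvWitness_occupation_template_sentences_all_pronouns.2.1) (pvWitness_occupation_template_sentences_all_pronouns.2.2.1) (pvWitness_occupation_template_sentences_all_pronouns.2.2.2.1) (pvWitness_occupation_template_sentences_all_pronouns.2.2.2.2.1) (pvWitness_occupation_template_sentences_all_pronouns.2.2.2.2.2) := by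
  decide

-- A's per-gender map functions, named for the proofs
def pvFm (x : String) : String := if !(pvA_special.contains x) then x else (pvA_male.get? x).getD ""
def pvFf (x : String) : String := if !(pvA_special.contains x) then x else (pvA_female.get? x).getD ""
def pvFn (x : String) : String := if !(pvA_special.contains x) then x else (pvA_neutral.get? x).getD ""

-- B's pronoun triple agrees pointwise with A's three map functions
theorem pvTrip_eq (x : String) : (pvB_pron.get? x).getD (x, x, x) = (pvFm x, pvFf x, pvFn x) := by
  by_cases h1 : x = "$NOM_PRONOUN"
  · subst h1; decide
  by_cases h2 : x = "$POSS_PRONOUN"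
  · subst h2; decide
  by_cases h3 : x = "$ACC_PRONOUN"
  · subst h3; decide
  have hg : pvB_pron.get? x = none := by
    have hmk : pvB_pron = PySem.Dict.mk [("$NOM_PRONOUN", ("he", "she", "they")),
        ("$POSS_PRONOUN", ("his", "her", "their")), ("$ACC_PRONOUN", ("him", "her", "them"))] := by decide
    rw [hmk]
    simp [PySem.Dict.get?_mk_cons, Ne.symm h1, Ne.symm h2, Ne.symm h3]
    rfl
  have hc : pvA_special.contains x = false := by
    simp only [pvA_special, PySem.Set.contains_eq_listContains, List.contains_eq_mem,
      PySem.Set.mem_ofList, List.mem_cons, h1, h2, h3, List.not_mem_nil, or_self, decide_false]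
  have hnm : x ∉ pvA_special := by
    simp [pvA_special, PySem.Set.mem_ofList, h1, h2, h3]
  simp [hg, pvFm, pvFf, pvFn, hnm]

-- the flag-based token substitution B's loop performs
def pvSubst (target : Option String) (value occ : String) : List String → Bool → Bool → List String
  | [], _, _ => []
  | t :: ts, od, sd =>
    if t == "$OCCUPATION" && !od then occ :: pvSubst target value occ ts true sd
    else if some t == target && !sd then value :: pvSubst target value occ ts od true
    else t :: pvSubst target value occ ts od sd

-- set at an optional index
def pvSetAt (o : Option Nat) (v : String) (l : List String) : List String :=
  match o with
  | none => l
  | some i => l.set i v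

-- the (optional) index of B's substitution target
def pvIdxT (target : Option String) (l : List String) : Option Nat :=
  match target with
  | none => none
  | some t => PySem.List.index? l t

theorem pvSetAt_none (v : String) (l : List String) : pvSetAt none v l = l := rfl
theorem pvSetAt_zero (v t : String) (ts : List String) : pvSetAt (some 0) v (t :: ts) = v :: ts := rfl
theorem pvSetAt_map_succ (o : Option Nat) (v t : String) (ts : List String) :
    pvSetAt (o.map (· + 1)) v (t :: ts) = t :: pvSetAt o v ts := by
  cases o <;> rfl

-- B's flag substitution = A's set-at-first-index substitutions (indices taken in the ORIGINAL list)
theorem pvIdxT_cons_of_ne (target : Option String) (t : String) (ts : List String)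
    (h : target ≠ some t) : pvIdxT target (t :: ts) = (pvIdxT target ts).map (· + 1) := by
  cases target with
  | none => rfl
  | some s =>
    simp only [pvIdxT]
    exact PySem.List.index?_cons_of_ne _ (fun he => h (by rw [he]))

theorem pvSubst_eq (target : Option String) (value occ : String)
    (htgt : target ≠ some "$OCCUPATION") :
    ∀ (ts : List String) (od sd : Bool),
      pvSubst target value occ ts od sd =
        pvSetAt (if od then none else PySem.List.index? ts "$OCCUPATION") occ
          (pvSetAt (if sd then none else pvIdxT target ts) value ts) := by
  intro ts
  induction ts with
  | nil =>
    intro od sd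
    have h0 : ∀ (o : Option Nat) (v : String), pvSetAt o v [] = [] := by
      intro o v; cases o <;> rfl
    cases od <;> cases sd <;> simp [pvSubst, h0]
  | cons t ts ih =>
    intro od sd
    by_cases ht : t = "$OCCUPATION"
    · subst ht
      have htg : pvIdxT target ("$OCCUPATION" :: ts) = (pvIdxT target ts).map (· + 1) :=
        pvIdxT_cons_of_ne target _ ts (fun h => htgt h)
      have htne : ¬ (some "$OCCUPATION" == target) = true := by
        cases target with
        | none => simp
        | some s => simp; intro h; exact htgt (by rw [h])
      have hidx : PySem.List.index? ("$OCCUPATION" :: ts) "$OCCUPATION" = some 0 :=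
        PySem.List.index?_cons_self _ _
      have hidx' : List.idxOf? "$OCCUPATION" ("$OCCUPATION" :: ts) = some 0 := by simpa using hidx
      cases od <;> cases sd <;>
        simp_all [pvSubst, pvSetAt_map_succ, pvSetAt_zero, pvSetAt_none]
    · have hidx : PySem.List.index? (t :: ts) "$OCCUPATION" = (PySem.List.index? ts "$OCCUPATION").map (· + 1) :=
        PySem.List.index?_cons_of_ne _ ht
      by_cases htv : (some t == target) = true
      · -- t is the substitution target
        have htg0 : pvIdxT target (t :: ts) = some 0 := by
          cases target with
          | none => simp at htv
          | some s =>
            have hts : t = s := by simpa using htv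
            subst hts
            exact PySem.List.index?_cons_self _ _
        have ht' : (t == "$OCCUPATION") = false := by simpa using ht
        have hidx' : List.idxOf? "$OCCUPATION" (t :: ts) = (List.idxOf? "$OCCUPATION" ts).map (· + 1) := by
          simpa using hidx
        cases od <;> cases sd <;>
          simp [pvSubst, ht', htv, hidx', htg0, ih, pvSetAt_map_succ, pvSetAt_zero, pvSetAt_none]
      · have htg : pvIdxT target (t :: ts) = (pvIdxT target ts).map (· + 1) := by
          apply pvIdxT_cons_of_ne
          intro h; subst h; simp at htv
        have ht' : (t == "$OCCUPATION") = false := by simpa using ht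
        have hidx' : List.idxOf? "$OCCUPATION" (t :: ts) = (List.idxOf? "$OCCUPATION" ts).map (· + 1) := by
          simpa using hidx
        cases od <;> cases sd <;>
          simp [pvSubst, ht', htv, hidx', htg, ih, pvSetAt_map_succ, pvSetAt_none]

-- B's loop = flag substitution followed by the three per-gender maps
theorem pvFoldl_eq (occupation : String) (target : Option String) (value : String) :
    ∀ (ts : List String) (od sd : Bool) (m f n : List String),
      (ts.foldl (pvB_step occupation target value) ((od, sd), m, f, n)).2 =
        (m ++ (pvSubst target value occupation ts od sd).map pvFm,
         f ++ (pvSubst target value occupation ts od sd).map pvFf,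
         n ++ (pvSubst target value occupation ts od sd).map pvFn) := by
  intro ts
  induction ts with
  | nil => intro od sd m f n; simp [pvSubst]
  | cons t ts ih =>
    intro od sd m f n
    simp only [List.foldl_cons]
    by_cases hoc : (t == "$OCCUPATION" && !od) = true
    · rw [show pvB_step occupation target value ((od, sd), m, f, n) t =
          ((true, sd), m ++ [pvFm occupation], f ++ [pvFf occupation], n ++ [pvFn occupation]) by
        simp [pvB_step, hoc, pvTrip_eq]]
      rw [ih]
      simp [pvSubst, hoc]
    · by_cases htv : (some t == target && !sd) = true
      · rw [show pvB_step occupation target value ((od, sd), m, f, n) t =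
            ((od, true), m ++ [pvFm value], f ++ [pvFf value], n ++ [pvFn value]) by
          simp [pvB_step, hoc, htv, pvTrip_eq]]
        rw [ih]
        simp [pvSubst, hoc, htv]
      · rw [show pvB_step occupation target value ((od, sd), m, f, n) t =
            ((od, sd), m ++ [pvFm t], f ++ [pvFf t], n ++ [pvFn t]) by
          simp [pvB_step, hoc, htv, pvTrip_eq]]
        rw [ih]
        simp [pvSubst, hoc, htv]

-- B's loop flags: occ_done / sub_done record whether a $OCCUPATION / target token was seen
theorem pvFoldl_flags (occupation : String) (target : Option String) (value : String)
    (htgt : target ≠ some "$OCCUPATION") :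
    ∀ (ts : List String) (od sd : Bool) (m f n : List String),
      (ts.foldl (pvB_step occupation target value) ((od, sd), m, f, n)).1 =
        (od || ts.any (· == "$OCCUPATION"), sd || ts.any (fun t => some t == target)) := by
  intro ts
  induction ts with
  | nil => intro od sd m f n; cases od <;> cases sd <;> simp
  | cons t ts ih =>
    intro od sd m f n
    simp only [List.foldl_cons]
    by_cases hoc : (t == "$OCCUPATION" && !od) = true
    · have ht : (t == "$OCCUPATION") = true := (Bool.and_eq_true_iff.mp hoc).1
      have ht' : t = "$OCCUPATION" := by simpa using ht
      have htne : (some t == target) = false := by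
        subst ht'
        cases target with
        | none => rfl
        | some s =>
          simp only [beq_eq_false_iff_ne, ne_eq, Option.some.injEq]
          intro h; exact htgt (by rw [h])
      rw [show pvB_step occupation target value ((od, sd), m, f, n) t =
          ((true, sd), m ++ [pvFm occupation], f ++ [pvFf occupation], n ++ [pvFn occupation]) by
        simp [pvB_step, hoc, pvTrip_eq]]
      rw [ih]
      simp [ht, htne]
    · by_cases htv : (some t == target && !sd) = true
      · rw [show pvB_step occupation target value ((od, sd), m, f, n) t =
            ((od, true), m ++ [pvFm value], f ++ [pvFf value], n ++ [pvFn value]) by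
          simp [pvB_step, hoc, htv, pvTrip_eq]]
        rw [ih]
        have h1 : (some t == target) = true := (Bool.and_eq_true_iff.mp htv).1
        have ht0 : (t == "$OCCUPATION") = false := by
          have h1' : some t = target := by simpa using h1
          subst h1'
          simpa using fun h => htgt (by simp [h])
        simp [h1, ht0]
      · rw [show pvB_step occupation target value ((od, sd), m, f, n) t =
            ((od, sd), m ++ [pvFm t], f ++ [pvFf t], n ++ [pvFn t]) by
          simp [pvB_step, hoc, htv, pvTrip_eq]]
        rw [ih]
        have hoc' : (t == "$OCCUPATION" && !od) = false := by simpa using hoc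
        have htv' : (some t == target && !sd) = false := by simpa using htv
        cases od <;> cases sd <;> simp_all

-- ===== VERDICT (by name: the statement is the Claim_ definition above) =====
theorem occupation_template_sentences_all_pronouns_spec : Claim_equal_occupation_template_sentences_all_pronouns := by
  intro occupation template_sentence other_participant other_object model_domain context_op hDom hPre
  unfold Spec_occupation_template_sentences_all_pronouns
  obtain ⟨hocc, hrest⟩ := hPre
  simp only [occupation_template_sentences_all_pronouns, occupation_template_sentences_all_pronouns_alt]
  set sc := (PySem.Str.split? template_sentence " ").getD [] with hsc
  obtain ⟨i, hi⟩ : ∃ i, PySem.List.index? sc "$OCCUPATION" = some i := by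
    have := (PySem.List.index?_isSome_iff (xs := sc) (v := "$OCCUPATION")).mpr hocc
    exact Option.isSome_iff_exists.mp this
  rw [hi]
  by_cases hps : (other_participant.isSome || other_object.isSome) = true
  · by_cases hmd : (model_domain == "CLIP") = true
    · have hprop : other_participant ≠ none ∨ other_object ≠ none := by
        rcases Bool.or_eq_true_iff.mp hps with h | h
        · exact Or.inl (by simpa [Option.isSome_iff_ne_none] using h)
        · exact Or.inr (by simpa [Option.isSome_iff_ne_none] using h)
      have hmd' : model_domain = "CLIP" := by simpa using hmd
      have hrest' := hrest hprop hmd'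
      cases context_op with
      | true =>
        simp only [if_true] at hrest'
        obtain ⟨hpmem, _⟩ := hrest'
        obtain ⟨p, hp⟩ : ∃ p, PySem.List.index? sc "$PARTICIPANT" = some p := by
          have := (PySem.List.index?_isSome_iff (xs := sc) (v := "$PARTICIPANT")).mpr hpmem
          exact Option.isSome_iff_exists.mp this
        rw [hp]
        have hfold := pvFoldl_eq occupation (some "$PARTICIPANT") (other_participant.getD "") sc false false [] [] []
        have hsub := pvSubst_eq (some "$PARTICIPANT") (other_participant.getD "") occupation (by decide) sc false false
        simp only [pvIdxT, hi, hp, Bool.false_eq_true, if_false] at hsub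
        have hflags := pvFoldl_flags occupation (some "$PARTICIPANT") (other_participant.getD "") (by decide) sc false false [] [] []
        have hany : (sc.any (· == "$OCCUPATION")) = true := List.any_eq_true.mpr ⟨_, hocc, by simp⟩
        have hanyT : (sc.any (fun t => some t == some "$PARTICIPANT")) = true := List.any_eq_true.mpr ⟨_, hpmem, by simp⟩
        simp only [hps, hmd, Bool.true_and, if_true]
        rw [hflags, hfold, hsub]
        simp only [hany, hanyT, pvSetAt, List.nil_append, Bool.false_or, Bool.not_true,
          Option.isSome_some, Bool.true_and, Bool.false_eq_true, if_false]
        rfl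
      | false =>
        simp only [Bool.false_eq_true, if_false] at hrest'
        obtain ⟨homem, _⟩ := hrest'
        obtain ⟨p, hp⟩ : ∃ p, PySem.List.index? sc "$OBJECT" = some p := by
          have := (PySem.List.index?_isSome_iff (xs := sc) (v := "$OBJECT")).mpr homem
          exact Option.isSome_iff_exists.mp this
        rw [hp]
        have hfold := pvFoldl_eq occupation (some "$OBJECT") (other_object.getD "") sc false false [] [] []
        have hsub := pvSubst_eq (some "$OBJECT") (other_object.getD "") occupation (by decide) sc false false
        simp only [pvIdxT, hi, hp, Bool.false_eq_true, if_false] at hsub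
        have hflags := pvFoldl_flags occupation (some "$OBJECT") (other_object.getD "") (by decide) sc false false [] [] []
        have hany : (sc.any (· == "$OCCUPATION")) = true := List.any_eq_true.mpr ⟨_, hocc, by simp⟩
        have hanyT : (sc.any (fun t => some t == some "$OBJECT")) = true := List.any_eq_true.mpr ⟨_, homem, by simp⟩
        simp only [hps, hmd, Bool.true_and, if_true, Bool.false_eq_true, if_false]
        rw [hflags, hfold, hsub]
        simp only [hany, hanyT, pvSetAt, List.nil_append, Bool.false_or, Bool.not_true,
          Option.isSome_some, Bool.true_and, Bool.false_eq_true, if_false]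
        rfl
    · -- model_domain ≠ "CLIP": no participant/object substitution; B's target is none
      have hfold := pvFoldl_eq occupation none "" sc false false [] [] []
      have hsub := pvSubst_eq none "" occupation (by simp) sc false false
      simp only [pvIdxT, hi, Bool.false_eq_true, if_false] at hsub
      have hmd0 : (model_domain == "CLIP") = false := by simpa using hmd
      have hflags := pvFoldl_flags occupation none "" (by simp) sc false false [] [] []
      have hany : (sc.any (· == "$OCCUPATION")) = true := List.any_eq_true.mpr ⟨_, hocc, by simp⟩
      simp only [hps, hmd0, Bool.and_false, Bool.false_eq_true, if_false]
      rw [hflags, hfold, hsub]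
      simp only [hany, pvSetAt, List.nil_append, Bool.false_or, Bool.not_true,
        Option.isSome_none, Bool.false_and, Bool.false_eq_true, if_false]
      rfl
  · -- both other_participant and other_object are None
    have hfold := pvFoldl_eq occupation none "" sc false false [] [] []
    have hsub := pvSubst_eq none "" occupation (by simp) sc false false
    simp only [pvIdxT, hi, Bool.false_eq_true, if_false] at hsub
    have hps0 : (other_participant.isSome || other_object.isSome) = false := by simpa using hps
    have hflags := pvFoldl_flags occupation none "" (by simp) sc false false [] [] []
    have hany : (sc.any (· == "$OCCUPATION")) = true := List.any_eq_true.mpr ⟨_, hocc, by simp⟩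
    simp only [hps0, Bool.false_and, Bool.false_eq_true, if_false]
    rw [hflags, hfold, hsub]
    simp only [hany, pvSetAt, List.nil_append, Bool.false_or, Bool.not_true,
      Option.isSome_none, Bool.false_and, Bool.false_eq_true, if_false]
    rfl
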